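-- pv_equiv track=rewrite | github.com/SDragon42/AdventOfCode | 2020/Python/src/day24.py | parse_move_line
-- ===== SOURCE A (Python) =====
-- from typing import List, Dict, Tuple
--
-- def parse_move_line(line: str) -> List[str]:
--     moveList: List[str] = []
--     i = 0
--     while i < len(line):
--         toCopy = 1
--         if line[i] == 'n' or line[i] == 's':
--             toCopy = 2
--         moveList.append(line[i:i+toCopy])
--         i += toCopy
--     return moveList
-- ===== SOURCE B (Python) =====
-- def parse_move_line(line: str):
--     # single pass, one-char-lookbehind state machine: an 'n'/'s' waits in
--     # `pending` for its partner character; no index arithmetic, no slicing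
--     moveList = []
--     pending = None
--     for c in line:
--         if pending is not None:
--             moveList.append(pending + c)
--             pending = None
--         elif c == 'n' or c == 's':
--             pending = c
--         else:
--             moveList.append(c)
--     if pending is not None:
--         moveList.append(pending)
--     return moveList
-- ===== Notes on version B (the rewrite author's own statement) =====
-- stated objective: alternative
-- what changed: Replaces A's index-driven while loop that slices 1- or 2-character chunks out of the string with a single pass over the characters using a one-character lookbehind state (a pending 'n'/'s' waiting for its partner), eliminating index arithmetic and repeated slicing.
import Mathlib
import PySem

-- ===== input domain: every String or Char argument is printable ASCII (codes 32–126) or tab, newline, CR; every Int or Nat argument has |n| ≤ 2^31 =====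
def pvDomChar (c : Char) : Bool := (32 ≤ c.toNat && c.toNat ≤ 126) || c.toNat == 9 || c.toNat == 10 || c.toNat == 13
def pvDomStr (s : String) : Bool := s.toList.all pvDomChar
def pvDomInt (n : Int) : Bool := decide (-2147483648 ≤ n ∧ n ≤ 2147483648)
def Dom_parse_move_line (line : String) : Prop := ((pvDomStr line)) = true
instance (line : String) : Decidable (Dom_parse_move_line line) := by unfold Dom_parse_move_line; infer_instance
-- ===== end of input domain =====

-- B replaces A's index-and-slice while loop by a single pass with a one-character
-- lookbehind state ('alternative'; same asymptotic cost).

-- ===== PORT A =====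
-- while loop over an index i, appending the slice line[i:i+toCopy] (toCopy = 2 after 'n'/'s', else 1)
def pvParseA (cs : List Char) (i : Nat) : List String :=
  if h : i < cs.length then
    if cs[i] = 'n' ∨ cs[i] = 's' then
      String.ofList (PySem.List.slice cs (some (i : Int)) (some ((i : Int) + 2)))
        :: pvParseA cs (i + 2)
    else
      String.ofList (PySem.List.slice cs (some (i : Int)) (some ((i : Int) + 1)))
        :: pvParseA cs (i + 1)
  else []
termination_by cs.length - i

def parse_move_line (line : String) : List String := pvParseA line.toList 0

-- ===== PORT B =====
-- state machine: `pending = some p` means an 'n'/'s' p is waiting for its partner char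
def pvParseB : List Char → Option Char → List String
  | [], none => []
  | [], some p => [String.ofList [p]]
  | c :: rest, some p => String.ofList [p, c] :: pvParseB rest none
  | c :: rest, none =>
      if c = 'n' ∨ c = 's' then pvParseB rest (some c)
      else String.ofList [c] :: pvParseB rest none

def parse_move_line_alt (line : String) : List String := pvParseB line.toList none

-- ===== PRECONDITION & SPEC =====
def Spec_parse_move_line (line : String) (out : List String) : Prop := out = parse_move_line_alt line
instance (line : String) (out : List String) : Decidable (Spec_parse_move_line line out) := by unfold Spec_parse_move_line; infer_instance

-- ===== CLAIM (what is proved, stated in full; the proofs are below) =====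
def Claim_equal_parse_move_line : Prop := ∀ (line : String), Dom_parse_move_line line → Spec_parse_move_line line (parse_move_line line)

-- ===== LEMMAS AND PROOFS =====

lemma pvParseB_cons_none (c : Char) (rest : List Char) :
    pvParseB (c :: rest) none =
      if c = 'n' ∨ c = 's' then pvParseB rest (some c)
      else String.ofList [c] :: pvParseB rest none := rfl

lemma pvParseB_cons_some (p c : Char) (rest : List Char) :
    pvParseB (c :: rest) (some p) = String.ofList [p, c] :: pvParseB rest none := rfl

lemma pvParseB_nil_some (p : Char) : pvParseB [] (some p) = [String.ofList [p]] := rfl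

lemma pvParseA_eq_parseB (cs : List Char) (i : Nat) :
    pvParseA cs i = pvParseB (cs.drop i) none := by
  induction i using pvParseA.induct (cs := cs) with
  | case1 i h hns ih =>
    rw [pvParseA]
    simp only [dif_pos h, if_pos hns]
    have hdrop : cs.drop i = cs[i] :: cs.drop (i + 1) := List.drop_eq_getElem_cons h
    have hs := PySem.List.slice_natCast_add cs i 2
    norm_num at hs
    rcases hrest : cs.drop (i + 1) with _ | ⟨d, t⟩
    · have ht : (cs.drop i).take 2 = [cs[i]] := by
        rw [hdrop, hrest, List.take_succ_cons, List.take_nil]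
      have h2 : cs.drop (i + 2) = [] :=
        List.drop_eq_nil_of_le (by have := List.drop_eq_nil_iff.mp hrest; omega)
      rw [hs, ht, ih, h2, hdrop, hrest]
      rw [pvParseB_cons_none, if_pos hns, pvParseB_nil_some]
      rfl
    · have ht : (cs.drop i).take 2 = [cs[i], d] := by
        rw [hdrop, hrest, List.take_succ_cons, List.take_succ_cons, List.take_zero]
      have h2 : cs.drop (i + 2) = t := by
        have h3 := congrArg (List.drop 1) hrest
        rw [List.drop_drop] at h3
        simpa using h3
      rw [hs, ht, ih, h2, hdrop, hrest]
      rw [pvParseB_cons_none, if_pos hns, pvParseB_cons_some]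
  | case2 i h hns ih =>
    rw [pvParseA]
    simp only [dif_pos h, if_neg hns]
    have hdrop : cs.drop i = cs[i] :: cs.drop (i + 1) := List.drop_eq_getElem_cons h
    have hs := PySem.List.slice_natCast_add cs i 1
    norm_num at hs
    have ht : (cs.drop i).take 1 = [cs[i]] := by
      rw [hdrop, List.take_succ_cons, List.take_zero]
    rw [hs, ht, ih, hdrop]
    rw [pvParseB_cons_none, if_neg hns]
  | case3 i h =>
    rw [pvParseA]
    simp only [dif_neg h]
    rw [List.drop_eq_nil_of_le (by omega)]
    rfl

-- ===== VERDICT (by name: the statement is the Claim_ definition above) =====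
theorem parse_move_line_spec : Claim_equal_parse_move_line := by
  intro line _
  unfold Spec_parse_move_line parse_move_line parse_move_line_alt
  simpa using pvParseA_eq_parseB line.toList 0
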